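-- pv_equiv track=rewrite | github.com/Rudheer127/SunDevil_Circles | app.py | get_mock_support_options
-- ===== SOURCE A (Python) =====
-- def get_mock_support_options(issue_text, profile_dict):
--     """Generate deterministic support options based on keywords."""
--     options = ["Talk to a peer who understands your situation"]
--     issue_lower = issue_text.lower()
--
--     if any(w in issue_lower for w in ["lonely", "alone", "isolated", "miss"]):
--         options.append("Join a peer support group for homesickness")
--     if any(w in issue_lower for w in ["stress", "pressure", "overwhelm", "exam", "grade"]):
--         options.append("Explore academic support resources")
--     if any(w in issue_lower for w in ["friend", "social", "connect", "people"]):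
--         options.append("Attend a campus social event")
--     if any(w in issue_lower for w in ["language", "english", "speak", "communication"]):
--         options.append("Use language exchange or tutoring services")
--     if any(w in issue_lower for w in ["money", "financial", "expensive", "afford"]):
--         options.append("Consult financial aid or emergency assistance")
--     if any(w in issue_lower for w in ["health", "sick", "doctor", "tired", "sleep"]):
--         options.append("Visit campus health services")
--
--     if len(options) == 1:
--         options.append("Reach out to the International Students Center")
--         options.append("Speak with a counselor for guidance")
--
--     return options[:5]
-- ===== SOURCE B (Python) =====
-- _KEYWORDS = [
--     ("lonely", 0), ("alone", 0), ("isolated", 0), ("miss", 0),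
--     ("stress", 1), ("pressure", 1), ("overwhelm", 1), ("exam", 1), ("grade", 1),
--     ("friend", 2), ("social", 2), ("connect", 2), ("people", 2),
--     ("language", 3), ("english", 3), ("speak", 3), ("communication", 3),
--     ("money", 4), ("financial", 4), ("expensive", 4), ("afford", 4),
--     ("health", 5), ("sick", 5), ("doctor", 5), ("tired", 5), ("sleep", 5),
-- ]
-- _OPTIONS = [
--     "Join a peer support group for homesickness",
--     "Explore academic support resources",
--     "Attend a campus social event",
--     "Use language exchange or tutoring services",
--     "Consult financial aid or emergency assistance",
--     "Visit campus health services",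
-- ]
--
--
-- def get_mock_support_options(issue_text, profile_dict):
--     low = issue_text.lower()
--     matched = sorted({i for k, i in _KEYWORDS if k in low})
--     if not matched:
--         return ["Talk to a peer who understands your situation",
--                 "Reach out to the International Students Center",
--                 "Speak with a counselor for guidance"]
--     return (["Talk to a peer who understands your situation"]
--             + [_OPTIONS[i] for i in matched])[:5]
-- ===== Notes on version B (the rewrite author's own statement) =====
-- stated objective: alternative
-- what changed: Instead of six per-rule any() scans appending in source order, B inverts the index: one flat keyword-to-option-index table scanned once into a set of matched indices, then sorted(set) reconstructs the option list (plus a direct literal return for the no-match fallback).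
import Mathlib
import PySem

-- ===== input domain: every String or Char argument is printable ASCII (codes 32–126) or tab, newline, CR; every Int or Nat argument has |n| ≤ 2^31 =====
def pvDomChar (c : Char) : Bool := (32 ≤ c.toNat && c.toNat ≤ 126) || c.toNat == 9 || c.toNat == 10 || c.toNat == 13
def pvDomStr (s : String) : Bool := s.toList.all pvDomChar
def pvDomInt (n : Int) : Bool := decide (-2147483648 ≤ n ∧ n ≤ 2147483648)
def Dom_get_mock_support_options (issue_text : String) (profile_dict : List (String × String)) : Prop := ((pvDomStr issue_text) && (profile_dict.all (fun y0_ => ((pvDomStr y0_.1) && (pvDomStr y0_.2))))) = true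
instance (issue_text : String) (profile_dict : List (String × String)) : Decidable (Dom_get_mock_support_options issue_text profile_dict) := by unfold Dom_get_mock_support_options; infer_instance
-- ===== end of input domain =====

-- B inverts the rule index: one flat keyword→option-index table is scanned once into a set of
-- matched indices, and sorted(set) rebuilds the option list; same output (objective: alternative).

-- ===== PORT A =====
def get_mock_support_options (issue_text : String) (profile_dict : List (String × String)) : List String :=
  let options := ["Talk to a peer who understands your situation"]
  let issue_lower := PySem.Str.lower issue_text
  let options := if ["lonely", "alone", "isolated", "miss"].any (fun w => PySem.Str.isIn w issue_lower) then
      options ++ ["Join a peer support group for homesickness"] else options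
  let options := if ["stress", "pressure", "overwhelm", "exam", "grade"].any (fun w => PySem.Str.isIn w issue_lower) then
      options ++ ["Explore academic support resources"] else options
  let options := if ["friend", "social", "connect", "people"].any (fun w => PySem.Str.isIn w issue_lower) then
      options ++ ["Attend a campus social event"] else options
  let options := if ["language", "english", "speak", "communication"].any (fun w => PySem.Str.isIn w issue_lower) then
      options ++ ["Use language exchange or tutoring services"] else options
  let options := if ["money", "financial", "expensive", "afford"].any (fun w => PySem.Str.isIn w issue_lower) then
      options ++ ["Consult financial aid or emergency assistance"] else options
  let options := if ["health", "sick", "doctor", "tired", "sleep"].any (fun w => PySem.Str.isIn w issue_lower) then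
      options ++ ["Visit campus health services"] else options
  let options := if options.length == 1 then
      (options ++ ["Reach out to the International Students Center"]) ++ ["Speak with a counselor for guidance"]
    else options
  PySem.List.slice options none (some 5)

-- ===== PORT B =====
-- _KEYWORDS of Source B: flat keyword → option-index table
def pvKeywords : List (String × Int) :=
  [ ("lonely", 0), ("alone", 0), ("isolated", 0), ("miss", 0),
    ("stress", 1), ("pressure", 1), ("overwhelm", 1), ("exam", 1), ("grade", 1),
    ("friend", 2), ("social", 2), ("connect", 2), ("people", 2),
    ("language", 3), ("english", 3), ("speak", 3), ("communication", 3),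
    ("money", 4), ("financial", 4), ("expensive", 4), ("afford", 4),
    ("health", 5), ("sick", 5), ("doctor", 5), ("tired", 5), ("sleep", 5) ]

-- _OPTIONS of Source B
def pvOptions : List String :=
  [ "Join a peer support group for homesickness",
    "Explore academic support resources",
    "Attend a campus social event",
    "Use language exchange or tutoring services",
    "Consult financial aid or emergency assistance",
    "Visit campus health services" ]

def get_mock_support_options_alt (issue_text : String) (profile_dict : List (String × String)) : List String :=
  let low := PySem.Str.lower issue_text
  -- {i for k, i in _KEYWORDS if k in low}, then sorted(...)
  let matched := PySem.List.sorted
    (PySem.Set.ofList ((pvKeywords.filter (fun p => PySem.Str.isIn p.1 low)).map Prod.snd))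
    (fun x => x) false
  if matched = [] then
    [ "Talk to a peer who understands your situation",
      "Reach out to the International Students Center",
      "Speak with a counselor for guidance" ]
  else
    -- _OPTIONS[i]: every index in the table is 0..5, in range, so pyGet? never misses
    PySem.List.slice
      (["Talk to a peer who understands your situation"] ++
        matched.map (fun i => (PySem.List.pyGet? pvOptions i).getD ""))
      none (some 5)

-- ===== PRECONDITION & SPEC =====
def Spec_get_mock_support_options (issue_text : String) (profile_dict : List (String × String)) (out : List String) : Prop := out = get_mock_support_options_alt issue_text profile_dict
instance (issue_text : String) (profile_dict : List (String × String)) (out : List String) : Decidable (Spec_get_mock_support_options issue_text profile_dict out) := by unfold Spec_get_mock_support_options; infer_instance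

-- ===== CLAIM (what is proved, stated in full; the proofs are below) =====
def Claim_equal_get_mock_support_options : Prop := ∀ (issue_text : String) (profile_dict : List (String × String)), Dom_get_mock_support_options issue_text profile_dict → Spec_get_mock_support_options issue_text profile_dict (get_mock_support_options issue_text profile_dict)

-- ===== LEMMAS AND PROOFS =====

-- sorted(set(xs)) for xs drawn from {0..5} is the filter of [0..5] by membership in xs
theorem pv_sorted_set_eq_filter (xs : List Int)
    (h : ∀ i ∈ xs, i ∈ ([0, 1, 2, 3, 4, 5] : List Int)) :
    PySem.List.sorted (PySem.Set.ofList xs) (fun x => x) false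
      = ([0, 1, 2, 3, 4, 5] : List Int).filter (fun i => decide (i ∈ xs)) := by
  apply PySem.List.sorted_eq_of_perm_of_pairwise_lt
  · rw [List.perm_ext_iff_of_nodup (List.Nodup.filter _ (by decide)) (PySem.Set.nodup_ofList xs)]
    intro i
    simp only [List.mem_filter, PySem.Set.mem_ofList, decide_eq_true_eq]
    exact ⟨fun hp => hp.2, fun hm => ⟨h i hm, hm⟩⟩
  · exact List.Pairwise.filter _ ((by decide : List.Pairwise (fun a b : Int => a < b) [0,1,2,3,4,5]))

-- ===== VERDICT (by name: the statement is the Claim_ definition above) =====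
set_option maxHeartbeats 4000000 in
theorem get_mock_support_options_spec : Claim_equal_get_mock_support_options := by
  intro issue_text profile_dict _
  unfold Spec_get_mock_support_options get_mock_support_options get_mock_support_options_alt
  set low := PySem.Str.lower issue_text with hlow
  dsimp only
  have hsub : ∀ i ∈ ((pvKeywords.filter (fun p => PySem.Str.isIn p.1 low)).map Prod.snd),
      i ∈ ([0, 1, 2, 3, 4, 5] : List Int) := by
    intro i hi
    simp [pvKeywords, List.mem_filter] at hi ⊢
    tauto
  rw [pv_sorted_set_eq_filter _ hsub]
  have m0 : ((0:Int) ∈ ((pvKeywords.filter (fun p => PySem.Str.isIn p.1 low)).map Prod.snd))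
      ↔ (["lonely", "alone", "isolated", "miss"].any (fun w => PySem.Str.isIn w low) = true) := by
    simp [pvKeywords, List.mem_filter]
  have m1 : ((1:Int) ∈ ((pvKeywords.filter (fun p => PySem.Str.isIn p.1 low)).map Prod.snd))
      ↔ (["stress", "pressure", "overwhelm", "exam", "grade"].any (fun w => PySem.Str.isIn w low) = true) := by
    simp [pvKeywords, List.mem_filter]
  have m2 : ((2:Int) ∈ ((pvKeywords.filter (fun p => PySem.Str.isIn p.1 low)).map Prod.snd))
      ↔ (["friend", "social", "connect", "people"].any (fun w => PySem.Str.isIn w low) = true) := by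
    simp [pvKeywords, List.mem_filter]
  have m3 : ((3:Int) ∈ ((pvKeywords.filter (fun p => PySem.Str.isIn p.1 low)).map Prod.snd))
      ↔ (["language", "english", "speak", "communication"].any (fun w => PySem.Str.isIn w low) = true) := by
    simp [pvKeywords, List.mem_filter]
  have m4 : ((4:Int) ∈ ((pvKeywords.filter (fun p => PySem.Str.isIn p.1 low)).map Prod.snd))
      ↔ (["money", "financial", "expensive", "afford"].any (fun w => PySem.Str.isIn w low) = true) := by
    simp [pvKeywords, List.mem_filter]
  have m5 : ((5:Int) ∈ ((pvKeywords.filter (fun p => PySem.Str.isIn p.1 low)).map Prod.snd))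
      ↔ (["health", "sick", "doctor", "tired", "sleep"].any (fun w => PySem.Str.isIn w low) = true) := by
    simp [pvKeywords, List.mem_filter]
  cases hb1 : (["lonely", "alone", "isolated", "miss"].any (fun w => PySem.Str.isIn w low)) <;>
  cases hb2 : (["stress", "pressure", "overwhelm", "exam", "grade"].any (fun w => PySem.Str.isIn w low)) <;>
  cases hb3 : (["friend", "social", "connect", "people"].any (fun w => PySem.Str.isIn w low)) <;>
  cases hb4 : (["language", "english", "speak", "communication"].any (fun w => PySem.Str.isIn w low)) <;>
  cases hb5 : (["money", "financial", "expensive", "afford"].any (fun w => PySem.Str.isIn w low)) <;>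
  cases hb6 : (["health", "sick", "doctor", "tired", "sleep"].any (fun w => PySem.Str.isIn w low)) <;>
    (simp only [List.filter_cons, List.filter_nil, m0, m1, m2, m3, m4, m5,
      hb1, hb2, hb3, hb4, hb5, hb6]; decide)
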